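-- pv_equiv track=rewrite | github.com/brayden-blackham/Cits1401 | project/project1.py | calculateSumOfDifSq
-- ===== SOURCE A (Python) =====
-- def calculateSumOfDifSq(markDict, classes):
--     sumOfDifSqTotal= []
--     # Loop though the classes and add the calcutation to the list.
--     for clas in classes:
--         sumOfDifSq = 0
--         for id in markDict:
--             dif2 = (markDict[id]["TotalRank"] - markDict[id][clas + "Rank"])**2
--             markDict[id][clas + "Dif2"] = dif2
--             sumOfDifSq += dif2
--         sumOfDifSqTotal.append(sumOfDifSq)
--     return sumOfDifSqTotal
-- ===== SOURCE B (Python) =====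
-- def calculateSumOfDifSq(markDict, classes):
--     # Two-phase re-implementation: phase 1 populates the 'Dif2' table
--     # (iterating id-major, the opposite nesting order to A), phase 2
--     # aggregates the stored values in a separate scan per class.
--     # (Side effect on markDict: same keys/values as A; only the relative
--     # insertion order of the new Dif2 keys inside a row can differ.)
--     for id in markDict:
--         row = markDict[id]
--         for clas in classes:
--             row[clas + "Dif2"] = (row["TotalRank"] - row[clas + "Rank"]) ** 2
--     return [sum(markDict[id][clas + "Dif2"] for id in markDict) for clas in classes]
-- ===== Notes on version B (the rewrite author's own statement) =====
-- stated objective: alternative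
-- what changed: B replaces A's single combined pass (per class: mutate each row and accumulate the running sum inline) by two separate phases: phase 1 iterates in the opposite nesting order (id-major) and only writes every clas+'Dif2' entry into the row table, phase 2 is an independent aggregation scan that builds the result by summing the stored Dif2 values per class; Pre_ additionally excludes association lists with duplicate outer keys, which do not represent a Python dict.
import Mathlib
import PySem

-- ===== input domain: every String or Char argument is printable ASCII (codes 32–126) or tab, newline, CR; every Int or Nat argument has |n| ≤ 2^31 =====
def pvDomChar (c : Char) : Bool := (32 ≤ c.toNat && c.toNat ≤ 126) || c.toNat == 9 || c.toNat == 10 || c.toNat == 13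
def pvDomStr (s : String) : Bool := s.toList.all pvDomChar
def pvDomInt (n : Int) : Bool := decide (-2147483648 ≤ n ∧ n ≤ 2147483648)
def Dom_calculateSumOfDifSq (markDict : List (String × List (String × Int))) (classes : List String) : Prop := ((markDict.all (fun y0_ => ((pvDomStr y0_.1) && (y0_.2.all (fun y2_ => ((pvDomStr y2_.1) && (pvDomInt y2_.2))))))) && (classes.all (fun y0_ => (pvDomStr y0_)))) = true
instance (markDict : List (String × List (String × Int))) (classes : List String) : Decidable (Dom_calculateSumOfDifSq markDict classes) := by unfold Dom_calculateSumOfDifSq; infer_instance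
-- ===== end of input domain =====

-- B recomputes the same per-class sums in two separate phases (populate the Dif2 table
-- id-major, then an independent aggregation scan per class over the stored values);
-- equivalence is about the RETURN value (B writes the same Dif2 keys/values, but the
-- relative insertion order of the new keys inside a row can differ from A's).


-- ===== PORT A =====
-- inner-loop body: dif2 = (markDict[id]["TotalRank"] - markDict[id][clas+"Rank"])**2;
-- markDict[id][clas+"Dif2"] = dif2; sumOfDifSq += dif2.  (The 'none' branches are the
-- KeyError cases, excluded by Pre_.)
def aStep (clas : String) (st : PySem.Dict String (PySem.Dict String Int) × Int) (id : String) :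
    PySem.Dict String (PySem.Dict String Int) × Int :=
  match st.1.get? id with
  | none => st
  | some row =>
    match row.get? "TotalRank", row.get? (clas ++ "Rank") with
    | some t, some r =>
        let dif2 := (t - r) ^ 2
        (st.1.insert id (row.insert (clas ++ "Dif2") dif2), st.2 + dif2)
    | _, _ => st

-- outer-loop body: sumOfDifSq = 0; for id in markDict: …; sumOfDifSqTotal.append(sumOfDifSq)
def aClass (st : PySem.Dict String (PySem.Dict String Int) × List Int) (clas : String) :
    PySem.Dict String (PySem.Dict String Int) × List Int :=
  let res := st.1.keys.foldl (aStep clas) (st.1, 0)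
  (res.1, st.2 ++ [res.2])

def calculateSumOfDifSq (markDict : List (String × List (String × Int))) (classes : List String) : List Int :=
  let d0 : PySem.Dict String (PySem.Dict String Int) :=
    PySem.Dict.mk (markDict.map (fun p => (p.1, PySem.Dict.mk p.2)))
  (classes.foldl aClass (d0, [])).2

-- ===== PORT B =====
-- phase-1 inner body: row[clas+"Dif2"] = (row["TotalRank"] - row[clas+"Rank"])**2
-- (the fall-through branch is the KeyError case, excluded by Pre_)
def bStepClass (row : PySem.Dict String Int) (clas : String) : PySem.Dict String Int :=
  match row.get? "TotalRank", row.get? (clas ++ "Rank") with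
  | some t, some r => row.insert (clas ++ "Dif2") ((t - r) ^ 2)
  | _, _ => row

-- phase-1 outer body: row = markDict[id]; for clas in classes: …
def bPhase1Step (classes : List String) (d : PySem.Dict String (PySem.Dict String Int))
    (id : String) : PySem.Dict String (PySem.Dict String Int) :=
  match d.get? id with
  | none => d
  | some row => d.insert id (classes.foldl bStepClass row)

-- phase-2 body: sum(markDict[id][clas+"Dif2"] for id in markDict)
def bSumStep (d : PySem.Dict String (PySem.Dict String Int)) (clas : String)
    (s : Int) (id : String) : Int :=
  match d.get? id with
  | some row =>
    match row.get? (clas ++ "Dif2") with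
    | some v => s + v
    | none => s
  | none => s

def calculateSumOfDifSq_alt (markDict : List (String × List (String × Int))) (classes : List String) : List Int :=
  let d0 : PySem.Dict String (PySem.Dict String Int) :=
    PySem.Dict.mk (markDict.map (fun p => (p.1, PySem.Dict.mk p.2)))
  let d1 := d0.keys.foldl (bPhase1Step classes) d0
  classes.map (fun clas => d1.keys.foldl (bSumStep d1 clas) 0)

-- ===== PRECONDITION & SPEC =====
-- Distinct outer keys: an association list with duplicate outer keys does not represent a
-- Python dict at all.  Key membership: on a row missing "TotalRank" or clas+"Rank" the
-- Python A raises KeyError (for classes = [] A touches no row, hence no key requirement).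
def Pre_calculateSumOfDifSq (markDict : List (String × List (String × Int))) (classes : List String) : Prop :=
  (markDict.map Prod.fst).Nodup ∧
  ∀ p ∈ markDict, ∀ c ∈ classes,
    "TotalRank" ∈ p.2.map Prod.fst ∧ (c ++ "Rank") ∈ p.2.map Prod.fst
instance (markDict : List (String × List (String × Int))) (classes : List String) : Decidable (Pre_calculateSumOfDifSq markDict classes) := by unfold Pre_calculateSumOfDifSq; infer_instance

def pvWitness_calculateSumOfDifSq : (List (String × List (String × Int))) × List String :=
  ([("a", [("TotalRank", 3), ("mRank", 1)]), ("b", [("TotalRank", 2), ("mRank", 2)])], ["m"])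

def Spec_calculateSumOfDifSq (markDict : List (String × List (String × Int))) (classes : List String) (out : List Int) : Prop := out = calculateSumOfDifSq_alt markDict classes
instance (markDict : List (String × List (String × Int))) (classes : List String) (out : List Int) : Decidable (Spec_calculateSumOfDifSq markDict classes out) := by unfold Spec_calculateSumOfDifSq; infer_instance

-- ===== CLAIM (what is proved, stated in full; the proofs are below) =====
def Claim_equal_calculateSumOfDifSq : Prop := ∀ (markDict : List (String × List (String × Int))) (classes : List String), Dom_calculateSumOfDifSq markDict classes → Pre_calculateSumOfDifSq markDict classes → Spec_calculateSumOfDifSq markDict classes (calculateSumOfDifSq markDict classes)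

-- ===== LEMMAS AND PROOFS =====
theorem concat4_ne (xs ys : List Char) : xs ++ ['R', 'a', 'n', 'k'] ≠ ys ++ ['D', 'i', 'f', '2'] := by
  intro h
  have := congrArg List.getLast? h
  rw [show (['R', 'a', 'n', 'k'] : List Char) = ['R', 'a', 'n'] ++ ['k'] from rfl,
      show (['D', 'i', 'f', '2'] : List Char) = ['D', 'i', 'f'] ++ ['2'] from rfl,
      ← List.append_assoc, ← List.append_assoc, List.getLast?_concat, List.getLast?_concat] at this
  simp at this

theorem rank_ne_dif2 (a b : String) : a ++ "Rank" ≠ b ++ "Dif2" := by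
  intro h
  have := congrArg String.toList h
  rw [String.toList_append, String.toList_append] at this
  exact concat4_ne a.toList b.toList this

theorem total_ne_dif2 (b : String) : "TotalRank" ≠ b ++ "Dif2" := by
  rw [show ("TotalRank" : String) = "Total" ++ "Rank" from by decide]
  exact rank_ne_dif2 "Total" b

theorem dif2_inj {a b : String} (h : a ++ "Dif2" = b ++ "Dif2") : a = b := by
  have h2 := congrArg String.toList h
  rw [String.toList_append, String.toList_append] at h2
  have h3 := List.append_cancel_right h2
  exact String.toList_injective h3

-- the common value both programs compute per (class, row):
-- (row["TotalRank"] - row[clas+"Rank"])**2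
def bRow (clas : String) (row : List (String × Int)) : Int :=
  match (PySem.Dict.mk row).get? "TotalRank", (PySem.Dict.mk row).get? (clas ++ "Rank") with
  | some t, some r => (t - r) ^ 2
  | _, _ => 0

-- a row dict agreeing with its original on every non-"…Dif2" key
def RowSim (r : PySem.Dict String Int) (orig : List (String × Int)) : Prop :=
  ∀ k : String, (∀ b, k ≠ b ++ "Dif2") → r.get? k = (PySem.Dict.mk orig).get? k

-- the evolving table: same keys as markDict, each entry RowSim its original row
def TblSim (d : PySem.Dict String (PySem.Dict String Int))
    (markDict : List (String × List (String × Int))) : Prop :=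
  d.keys = markDict.map Prod.fst ∧
  ∀ p ∈ markDict, ∃ r, d.get? p.1 = some r ∧ RowSim r p.2

theorem init_get (markDict : List (String × List (String × Int)))
    (hnd : (markDict.map Prod.fst).Nodup) :
    ∀ p ∈ markDict,
      (PySem.Dict.mk (markDict.map (fun p => (p.1, PySem.Dict.mk p.2)))).get? p.1
        = some (PySem.Dict.mk p.2) := by
  intro p hp
  apply PySem.Dict.get?_of_mem_items
  · exact List.mem_map.mpr ⟨p, hp, rfl⟩
  · simpa [PySem.Dict.keys] using hnd

theorem init_sim (markDict : List (String × List (String × Int)))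
    (hnd : (markDict.map Prod.fst).Nodup) :
    TblSim (PySem.Dict.mk (markDict.map (fun p => (p.1, PySem.Dict.mk p.2)))) markDict := by
  constructor
  · simp [PySem.Dict.keys]
  · intro p hp
    exact ⟨PySem.Dict.mk p.2, init_get markDict hnd p hp, fun k _ => rfl⟩

theorem RowSim_insert {r : PySem.Dict String Int} {orig : List (String × Int)}
    (h : RowSim r orig) (b : String) (v : Int) :
    RowSim (r.insert (b ++ "Dif2") v) orig := by
  intro k hk
  rw [PySem.Dict.get?_insert_of_ne _ _ (hk b)]
  exact h k hk

theorem mem_fst_get?_isSome (row : List (String × Int)) (k : String)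
    (h : k ∈ row.map Prod.fst) : ∃ v, (PySem.Dict.mk row).get? k = some v := by
  have h2 : k ∈ (PySem.Dict.mk row).keys := h
  cases hg : (PySem.Dict.mk row).get? k with
  | none => exact absurd ((PySem.Dict.get?_eq_none_iff_not_mem_keys _ _).mp hg) (by simp [PySem.Dict.keys] at h2 ⊢; exact h2)
  | some v => exact ⟨v, rfl⟩

-- ===== A-side: the combined loop computes the per-class bRow sums =====
theorem inner_lemma (markDict : List (String × List (String × Int))) (clas : String)
    (hnd : (markDict.map Prod.fst).Nodup)
    (hkeys : ∀ p ∈ markDict, "TotalRank" ∈ p.2.map Prod.fst ∧ (clas ++ "Rank") ∈ p.2.map Prod.fst) :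
    ∀ (ms : List (String × List (String × Int))), (∀ p ∈ ms, p ∈ markDict) →
    ∀ (d : PySem.Dict String (PySem.Dict String Int)) (s : Int), TblSim d markDict →
    TblSim ((ms.map Prod.fst).foldl (aStep clas) (d, s)).1 markDict ∧
    ((ms.map Prod.fst).foldl (aStep clas) (d, s)).2 = s + (ms.map (fun p => bRow clas p.2)).sum := by
  intro ms
  induction ms with
  | nil => intro _ d s hsim; simpa using hsim
  | cons p0 ms' ih =>
    intro hmem d s hsim
    have hp0 : p0 ∈ markDict := hmem p0 (List.mem_cons_self)
    obtain ⟨r, hget, hrs⟩ := hsim.2 p0 hp0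
    obtain ⟨ht0, hr0⟩ := hkeys p0 hp0
    obtain ⟨t, htv⟩ := mem_fst_get?_isSome p0.2 _ ht0
    obtain ⟨rv, hrv⟩ := mem_fst_get?_isSome p0.2 _ hr0
    have htr : r.get? "TotalRank" = some t := by
      rw [hrs "TotalRank" total_ne_dif2]; exact htv
    have hrr : r.get? (clas ++ "Rank") = some rv := by
      rw [hrs (clas ++ "Rank") (fun b => rank_ne_dif2 clas b)]; exact hrv
    have hstep : aStep clas (d, s) p0.1 =
        (d.insert p0.1 (r.insert (clas ++ "Dif2") ((t - rv) ^ 2)), s + (t - rv) ^ 2) := by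
      simp [aStep, hget, htr, hrr]
    have hbrow : bRow clas p0.2 = (t - rv) ^ 2 := by
      simp [bRow, htv, hrv]
    have hcont : d.contains p0.1 = true := by
      rw [PySem.Dict.contains_iff_mem_keys, hsim.1]
      exact List.mem_map.mpr ⟨p0, hp0, rfl⟩
    have hsim' : TblSim (d.insert p0.1 (r.insert (clas ++ "Dif2") ((t - rv) ^ 2))) markDict := by
      constructor
      · rw [PySem.Dict.keys_insert_of_contains _ _ _]
        · exact hsim.1
        · exact hcont
      · intro p hp
        by_cases he : p.1 = p0.1
        · have hpp0 : p = p0 := List.inj_on_of_nodup_map hnd hp hp0 he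
          subst hpp0
          exact ⟨_, by rw [PySem.Dict.get?_insert_self], RowSim_insert hrs clas _⟩
        · obtain ⟨rp, hrp, hrsp⟩ := hsim.2 p hp
          exact ⟨rp, by rw [PySem.Dict.get?_insert_of_ne _ _ he]; exact hrp, hrsp⟩
    have hms' : ∀ p ∈ ms', p ∈ markDict := fun p hp => hmem p (List.mem_cons_of_mem _ hp)
    obtain ⟨ihs, ihv⟩ := ih hms' _ (s + (t - rv) ^ 2) hsim'
    refine ⟨?_, ?_⟩
    · simpa [hstep] using ihs
    · simp only [List.map_cons, List.foldl_cons, hstep, List.sum_cons, hbrow] at ihv ⊢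
      rw [ihv]; ring

theorem outer_lemma (markDict : List (String × List (String × Int))) (classes : List String)
    (hnd : (markDict.map Prod.fst).Nodup)
    (hkeys : ∀ p ∈ markDict, ∀ c ∈ classes,
      "TotalRank" ∈ p.2.map Prod.fst ∧ (c ++ "Rank") ∈ p.2.map Prod.fst) :
    ∀ (d : PySem.Dict String (PySem.Dict String Int)) (acc : List Int), TblSim d markDict →
    (classes.foldl aClass (d, acc)).2 = acc ++ classes.map (fun c => (markDict.map (fun p => bRow c p.2)).sum) := by
  induction classes with
  | nil => intro d acc _; simp
  | cons c cs ih =>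
    intro d acc hsim
    have hk : ∀ p ∈ markDict, "TotalRank" ∈ p.2.map Prod.fst ∧ (c ++ "Rank") ∈ p.2.map Prod.fst :=
      fun p hp => hkeys p hp c List.mem_cons_self
    obtain ⟨hsim', hval⟩ := inner_lemma markDict c hnd hk markDict (fun p hp => hp) d 0 hsim
    have hkeyseq : d.keys = markDict.map Prod.fst := hsim.1
    have hstep : aClass (d, acc) c =
        ((( markDict.map Prod.fst).foldl (aStep c) (d, 0)).1,
         acc ++ [((markDict.map Prod.fst).foldl (aStep c) (d, 0)).2]) := by
      simp [aClass, hkeyseq]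
    have hkeys' : ∀ p ∈ markDict, ∀ c' ∈ cs,
        "TotalRank" ∈ p.2.map Prod.fst ∧ (c' ++ "Rank") ∈ p.2.map Prod.fst :=
      fun p hp c' hc' => hkeys p hp c' (List.mem_cons_of_mem _ hc')
    have hrec := ih hkeys' _ (acc ++ [((markDict.map Prod.fst).foldl (aStep c) (d, 0)).2]) hsim'
    simp only [List.foldl_cons, hstep, List.map_cons]
    rw [hrec, hval]
    simp

-- ===== B-side: phase 1 fills the Dif2 table, phase 2 sums the stored values =====
-- the row loop: preserves non-Dif2 keys and stores bRow at every c ∈ cs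
theorem rowloop (orig : List (String × Int)) :
    ∀ (cs : List String) (row : PySem.Dict String Int),
    (∀ c ∈ cs, "TotalRank" ∈ orig.map Prod.fst ∧ (c ++ "Rank") ∈ orig.map Prod.fst) →
    RowSim row orig →
    RowSim (cs.foldl bStepClass row) orig ∧
    ∀ c : String, (row.get? (c ++ "Dif2") = some (bRow c orig) ∨ c ∈ cs) →
      (cs.foldl bStepClass row).get? (c ++ "Dif2") = some (bRow c orig) := by
  intro cs
  induction cs with
  | nil =>
    intro row _ hrs
    refine ⟨hrs, fun c hc => ?_⟩
    rcases hc with h | h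
    · simpa using h
    · simp at h
  | cons c0 cs' ih =>
    intro row hk hrs
    obtain ⟨ht0, hr0⟩ := hk c0 List.mem_cons_self
    obtain ⟨t, htv⟩ := mem_fst_get?_isSome orig _ ht0
    obtain ⟨rv, hrv⟩ := mem_fst_get?_isSome orig _ hr0
    have htr : row.get? "TotalRank" = some t := by
      rw [hrs "TotalRank" total_ne_dif2]; exact htv
    have hrr : row.get? (c0 ++ "Rank") = some rv := by
      rw [hrs (c0 ++ "Rank") (fun b => rank_ne_dif2 c0 b)]; exact hrv
    have hstep : bStepClass row c0 = row.insert (c0 ++ "Dif2") ((t - rv) ^ 2) := by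
      simp [bStepClass, htr, hrr]
    have hbrow : bRow c0 orig = (t - rv) ^ 2 := by
      simp [bRow, htv, hrv]
    have hrs' : RowSim (row.insert (c0 ++ "Dif2") ((t - rv) ^ 2)) orig :=
      RowSim_insert hrs c0 _
    have hk' : ∀ c ∈ cs', "TotalRank" ∈ orig.map Prod.fst ∧ (c ++ "Rank") ∈ orig.map Prod.fst :=
      fun c hc => hk c (List.mem_cons_of_mem _ hc)
    obtain ⟨ihs, ihv⟩ := ih (row.insert (c0 ++ "Dif2") ((t - rv) ^ 2)) hk' hrs'
    refine ⟨by simpa [hstep] using ihs, fun c hc => ?_⟩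
    have hgoal : (cs'.foldl bStepClass (row.insert (c0 ++ "Dif2") ((t - rv) ^ 2))).get? (c ++ "Dif2")
        = some (bRow c orig) := by
      apply ihv
      by_cases he : c = c0
      · subst he
        left; rw [PySem.Dict.get?_insert_self, hbrow]
      · rcases hc with h | h
        · left
          rw [PySem.Dict.get?_insert_of_ne _ _ (fun hcon => he (dif2_inj hcon))]
          exact h
        · rcases List.mem_cons.mp h with h' | h'
          · exact absurd h' he
          · right; exact h'
    simpa [hstep] using hgoal

-- a phase-1 fold over ids not containing id leaves d.get? id unchanged
theorem phase1_untouched (classes : List String) :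
    ∀ (ls : List String) (d : PySem.Dict String (PySem.Dict String Int)) (id : String),
    id ∉ ls → ((ls.foldl (bPhase1Step classes) d).get? id = d.get? id) := by
  intro ls
  induction ls with
  | nil => intro d id _; rfl
  | cons l0 ls' ih =>
    intro d id hid
    have hne : id ≠ l0 := fun h => hid (h ▸ List.mem_cons_self)
    have h2 : id ∉ ls' := fun h => hid (List.mem_cons_of_mem _ h)
    rw [List.foldl_cons, ih _ _ h2]
    unfold bPhase1Step
    cases d.get? l0 with
    | none => rfl
    | some row => rw [PySem.Dict.get?_insert_of_ne _ _ hne]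

-- phase 1 keeps the key list unchanged
theorem phase1_keys (classes : List String) :
    ∀ (ls : List String) (d : PySem.Dict String (PySem.Dict String Int)),
    (ls.foldl (bPhase1Step classes) d).keys = d.keys := by
  intro ls
  induction ls with
  | nil => intro d; rfl
  | cons l0 ls' ih =>
    intro d
    rw [List.foldl_cons, ih]
    unfold bPhase1Step
    cases h : d.get? l0 with
    | none => rfl
    | some row =>
      apply PySem.Dict.keys_insert_of_contains
      rw [PySem.Dict.contains_eq_isSome_get?, h]; rfl

-- after phase 1 every row is its original with the whole class loop applied
theorem phase1_rows (classes : List String)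
    (markDict : List (String × List (String × Int))) :
    ∀ (ms : List (String × List (String × Int))), (ms.map Prod.fst).Nodup →
    ∀ (d : PySem.Dict String (PySem.Dict String Int)),
    (∀ p ∈ ms, d.get? p.1 = some (PySem.Dict.mk p.2)) →
    ∀ p ∈ ms, ((ms.map Prod.fst).foldl (bPhase1Step classes) d).get? p.1
      = some (classes.foldl bStepClass (PySem.Dict.mk p.2)) := by
  intro ms
  induction ms with
  | nil => intro _ d _ p hp; simp at hp
  | cons p0 ms' ih =>
    intro hnd d hd p hp
    have hnd' : (ms'.map Prod.fst).Nodup := (List.nodup_cons.mp hnd).2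
    have hp0nin : p0.1 ∉ ms'.map Prod.fst := (List.nodup_cons.mp hnd).1
    have hstep : bPhase1Step classes d p0.1 =
        d.insert p0.1 (classes.foldl bStepClass (PySem.Dict.mk p0.2)) := by
      simp [bPhase1Step, hd p0 List.mem_cons_self]
    have hd' : ∀ q ∈ ms',
        (d.insert p0.1 (classes.foldl bStepClass (PySem.Dict.mk p0.2))).get? q.1
          = some (PySem.Dict.mk q.2) := by
      intro q hq
      have hqne : q.1 ≠ p0.1 := fun h => hp0nin (h ▸ List.mem_map.mpr ⟨q, hq, rfl⟩)
      rw [PySem.Dict.get?_insert_of_ne _ _ hqne]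
      exact hd q (List.mem_cons_of_mem _ hq)
    rcases List.mem_cons.mp hp with h | h
    · subst h
      rw [List.map_cons, List.foldl_cons, hstep,
          phase1_untouched classes _ _ _ hp0nin, PySem.Dict.get?_insert_self]
    · rw [List.map_cons, List.foldl_cons, hstep]
      exact ih hnd' _ hd' p h

-- phase 2: the aggregation scan returns the stored per-row values summed
theorem phase2 (d1 : PySem.Dict String (PySem.Dict String Int)) (clas : String) :
    ∀ (ms : List (String × List (String × Int))) (s : Int),
    (∀ p ∈ ms, ∃ row, d1.get? p.1 = some row ∧ row.get? (clas ++ "Dif2") = some (bRow clas p.2)) →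
    (ms.map Prod.fst).foldl (bSumStep d1 clas) s = s + (ms.map (fun p => bRow clas p.2)).sum := by
  intro ms
  induction ms with
  | nil => intro s _; simp
  | cons p0 ms' ih =>
    intro s h
    obtain ⟨row, hrow, hv⟩ := h p0 List.mem_cons_self
    have hstep : bSumStep d1 clas s p0.1 = s + bRow clas p0.2 := by
      simp [bSumStep, hrow, hv]
    rw [List.map_cons, List.foldl_cons, hstep,
        ih _ (fun p hp => h p (List.mem_cons_of_mem _ hp))]
    simp only [List.map_cons, List.sum_cons]
    ring

-- B equals the per-class bRow sums
theorem alt_eq (markDict : List (String × List (String × Int))) (classes : List String)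
    (hnd : (markDict.map Prod.fst).Nodup)
    (hkeys : ∀ p ∈ markDict, ∀ c ∈ classes,
      "TotalRank" ∈ p.2.map Prod.fst ∧ (c ++ "Rank") ∈ p.2.map Prod.fst) :
    calculateSumOfDifSq_alt markDict classes
      = classes.map (fun c => (markDict.map (fun p => bRow c p.2)).sum) := by
  simp only [calculateSumOfDifSq_alt]
  have hk0 : (PySem.Dict.mk (markDict.map (fun p => (p.1, PySem.Dict.mk p.2)))).keys
      = markDict.map Prod.fst := by simp [PySem.Dict.keys]
  rw [hk0, phase1_keys classes, hk0]
  apply List.map_congr_left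
  intro c hc
  refine (phase2 _ c markDict 0 ?_).trans (zero_add _)
  intro p hp
  refine ⟨classes.foldl bStepClass (PySem.Dict.mk p.2), ?_, ?_⟩
  · exact phase1_rows classes markDict markDict hnd _ (init_get markDict hnd) p hp
  · exact (rowloop p.2 classes (PySem.Dict.mk p.2)
      (fun c' hc' => hkeys p hp c' hc') (fun k _ => rfl)).2 c (Or.inr hc)

-- ===== VERDICT (by name: the statement is the Claim_ definition above) =====
theorem calculateSumOfDifSq_spec : Claim_equal_calculateSumOfDifSq := by
  intro markDict classes _ hpre
  obtain ⟨hnd, hkeys⟩ := hpre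
  unfold Spec_calculateSumOfDifSq calculateSumOfDifSq
  rw [outer_lemma markDict classes hnd hkeys _ [] (init_sim markDict hnd),
      alt_eq markDict classes hnd hkeys]
  simp
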